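-- pv_equiv track=rewrite | github.com/David-Ciz/silver-truth | src/silver_truth/experiment_tracking.py | infer_split_label
-- ===== SOURCE A (Python) =====
-- from typing import Iterable, Optional
--
-- def infer_split_label(values: Iterable[object]) -> str:
--     cleaned = sorted(
--         {str(value) for value in values if value is not None and str(value)}
--     )
--     if not cleaned:
--         return "unknown"
--     if len(cleaned) == 1:
--         return cleaned[0]
--     return "multi:" + ",".join(cleaned)
-- ===== SOURCE B (Python) =====
-- def _merge(a, b):
--     # merge two strictly increasing lists, dropping duplicates across them
--     out = []
--     i = j = 0
--     while i < len(a) and j < len(b):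
--         if a[i] < b[j]:
--             out.append(a[i]); i += 1
--         elif b[j] < a[i]:
--             out.append(b[j]); j += 1
--         else:
--             out.append(a[i]); i += 1; j += 1
--     out.extend(a[i:])
--     out.extend(b[j:])
--     return out
--
-- def _dedup_sort(xs):
--     if len(xs) <= 1:
--         return xs
--     mid = len(xs) // 2
--     return _merge(_dedup_sort(xs[:mid]), _dedup_sort(xs[mid:]))
--
-- def infer_split_label(values):
--     items = []
--     for v in values:
--         if v is not None:
--             s = str(v)
--             if s:
--                 items.append(s)
--     result = _dedup_sort(items)
--     if not result:
--         return "unknown"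
--     if len(result) == 1:
--         return result[0]
--     return "multi:" + ",".join(result)
-- ===== Notes on version B (the rewrite author's own statement) =====
-- stated objective: alternative
-- what changed: Replaces A's hash-set deduplication followed by the library sort with a hand-written divide-and-conquer merge sort whose merge step eliminates duplicates as it combines the halves (no set, no sort call).
import Mathlib
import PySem

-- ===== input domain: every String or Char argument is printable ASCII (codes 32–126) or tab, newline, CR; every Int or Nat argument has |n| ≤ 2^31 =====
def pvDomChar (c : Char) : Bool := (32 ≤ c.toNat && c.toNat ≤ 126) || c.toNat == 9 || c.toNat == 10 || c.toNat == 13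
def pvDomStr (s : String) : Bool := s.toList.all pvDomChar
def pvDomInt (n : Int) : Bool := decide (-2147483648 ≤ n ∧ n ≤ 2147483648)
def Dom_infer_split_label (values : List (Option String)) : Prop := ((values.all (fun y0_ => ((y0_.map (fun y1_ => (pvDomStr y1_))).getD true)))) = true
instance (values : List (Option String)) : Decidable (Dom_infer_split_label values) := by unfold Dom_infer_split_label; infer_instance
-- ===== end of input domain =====

-- B replaces A's hash-set-then-library-sort pipeline by a hand-written merge sort whose
-- merge step drops duplicates while combining the halves (objective: alternative).

-- ===== PORT A =====
-- str(v) for non-None v keeping only truthy (nonempty) strings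
def pvKeep (values : List (Option String)) : List String :=
  values.filterMap (fun v => match v with
    | none => none
    | some s => if s = "" then none else some s)

def infer_split_label (values : List (Option String)) : String :=
  let cleaned := PySem.List.sorted (PySem.Set.ofList (pvKeep values)) (fun x => x) false
  if cleaned = [] then "unknown"
  else if cleaned.length = 1 then cleaned.headI
  else "multi:" ++ PySem.Str.join "," cleaned

-- ===== PORT B =====
-- Source B's index-based merge loop, written as the equivalent structural recursion:
-- same comparisons in the same order, the trailing extends are the one-sided cases
def pvMerge : List String → List String → List String
  | [], b => b
  | x :: a, [] => x :: a
  | x :: a, y :: b =>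
      if x < y then x :: pvMerge a (y :: b)
      else if y < x then y :: pvMerge (x :: a) b
      else x :: pvMerge a b

-- Source B's _dedup_sort: split at len//2 (xs[:mid] = take, xs[mid:] = drop; mid ≥ 0 so exact)
def pvDedupSort (xs : List String) : List String :=
  if h : xs.length ≤ 1 then xs
  else
    pvMerge (pvDedupSort (xs.take (xs.length / 2))) (pvDedupSort (xs.drop (xs.length / 2)))
termination_by xs.length
decreasing_by
  · simp only [List.length_take]; omega
  · simp only [List.length_drop]; omega

def infer_split_label_alt (values : List (Option String)) : String :=
  let items := values.foldl (fun acc v => match v with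
    | none => acc
    | some s => if s = "" then acc else acc ++ [s]) []
  let result := pvDedupSort items
  if result = [] then "unknown"
  else if result.length = 1 then result.headI
  else "multi:" ++ PySem.Str.join "," result

-- ===== PRECONDITION & SPEC =====
def Spec_infer_split_label (values : List (Option String)) (out : String) : Prop := out = infer_split_label_alt values
instance (values : List (Option String)) (out : String) : Decidable (Spec_infer_split_label values out) := by unfold Spec_infer_split_label; infer_instance

-- ===== CLAIM (what is proved, stated in full; the proofs are below) =====
def Claim_equal_infer_split_label : Prop := ∀ (values : List (Option String)), Dom_infer_split_label values → Spec_infer_split_label values (infer_split_label values)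

-- ===== LEMMAS AND PROOFS =====

-- Merging two strictly increasing lists yields a strictly increasing list with the union of members.
theorem pvMerge_spec : ∀ (a b : List String), a.Pairwise (· < ·) → b.Pairwise (· < ·) →
    (pvMerge a b).Pairwise (· < ·) ∧ ∀ z, z ∈ pvMerge a b ↔ z ∈ a ∨ z ∈ b := by
  intro a b
  fun_induction pvMerge a b with
  | case1 b => intro _ hb; exact ⟨hb, fun z => by simp⟩
  | case2 x a => intro ha _; exact ⟨ha, fun z => by simp⟩
  | case3 x a y b hxy ih =>
    intro ha hb
    obtain ⟨p1, p2⟩ := ih ha.of_cons hb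
    refine ⟨?_, fun z => ?_⟩
    · rw [List.pairwise_cons]
      refine ⟨fun c hc => ?_, p1⟩
      rcases (p2 c).mp hc with h | h
      · exact List.rel_of_pairwise_cons ha h
      · rcases List.mem_cons.mp h with h | h
        · exact h ▸ hxy
        · exact lt_trans hxy (List.rel_of_pairwise_cons hb h)
    · simp only [List.mem_cons, p2 z]; tauto
  | case4 x a y b hxy hyx ih =>
    intro ha hb
    obtain ⟨p1, p2⟩ := ih ha hb.of_cons
    refine ⟨?_, fun z => ?_⟩
    · rw [List.pairwise_cons]
      refine ⟨fun c hc => ?_, p1⟩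
      rcases (p2 c).mp hc with h | h
      · rcases List.mem_cons.mp h with h | h
        · exact h ▸ hyx
        · exact lt_trans hyx (List.rel_of_pairwise_cons ha h)
      · exact List.rel_of_pairwise_cons hb h
    · simp only [List.mem_cons, p2 z]; tauto
  | case5 x a y b hxy hyx ih =>
    intro ha hb
    have hxy' : x = y := le_antisymm (not_lt.mp hyx) (not_lt.mp hxy)
    obtain ⟨p1, p2⟩ := ih ha.of_cons hb.of_cons
    refine ⟨?_, fun z => ?_⟩
    · rw [List.pairwise_cons]
      refine ⟨fun c hc => ?_, p1⟩
      rcases (p2 c).mp hc with h | h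
      · exact List.rel_of_pairwise_cons ha h
      · exact hxy' ▸ List.rel_of_pairwise_cons hb h
    · simp only [List.mem_cons, p2 z]
      constructor
      · tauto
      · rintro ((h | h) | (h | h)) <;> try tauto
        exact Or.inl (by rw [h, hxy'])

-- The dedup merge sort returns a strictly increasing list with the same members as its input.
theorem pvDedupSort_spec : ∀ (xs : List String),
    (pvDedupSort xs).Pairwise (· < ·) ∧ ∀ z, z ∈ pvDedupSort xs ↔ z ∈ xs := by
  intro xs
  fun_induction pvDedupSort xs with
  | case1 xs h =>
    match xs, h with
    | [], _ => exact ⟨List.Pairwise.nil, fun z => Iff.rfl⟩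
    | [x], _ => exact ⟨List.pairwise_singleton _ _, fun z => Iff.rfl⟩
  | case2 xs h ih1 ih2 =>
    obtain ⟨q1, q2⟩ := ih1
    obtain ⟨r1, r2⟩ := ih2
    obtain ⟨p1, p2⟩ := pvMerge_spec _ _ q1 r1
    refine ⟨p1, fun z => ?_⟩
    rw [p2 z, q2 z, r2 z, ← List.mem_append, List.take_append_drop]

-- The two cleaned lists coincide: sorting the deduplicated set equals the dedup merge sort.
theorem pvCleaned_eq (values : List (Option String)) :
    PySem.List.sorted (PySem.Set.ofList (pvKeep values)) (fun x => x) false =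
      pvDedupSort (values.foldl (fun acc v => match v with
        | none => acc
        | some s => if s = "" then acc else acc ++ [s]) []) := by
  have hfold : ∀ (vs : List (Option String)) (acc : List String),
      vs.foldl (fun acc v => match v with
        | none => acc
        | some s => if s = "" then acc else acc ++ [s]) acc = acc ++ pvKeep vs := by
    intro vs
    induction vs with
    | nil => intro acc; simp [pvKeep]
    | cons v t ih =>
      intro acc
      cases v with
      | none => simp [pvKeep, ih]
      | some s =>
        by_cases hs : s = "" <;> simp [pvKeep, hs, ih]
  rw [hfold values [], List.nil_append]
  obtain ⟨p1, p2⟩ := pvDedupSort_spec (pvKeep values)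
  apply PySem.List.sorted_eq_of_perm_of_pairwise_lt
  · rw [List.perm_ext_iff_of_nodup p1.nodup (PySem.Set.nodup_ofList _)]
    intro a
    rw [p2 a, PySem.Set.mem_ofList]
  · simpa using p1

-- ===== VERDICT (by name: the statement is the Claim_ definition above) =====
theorem infer_split_label_spec : Claim_equal_infer_split_label := by
  intro values _
  unfold Spec_infer_split_label infer_split_label infer_split_label_alt
  rw [pvCleaned_eq values]
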